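-- pv_equiv track=rewrite | github.com/sergioma295/NanoSenAQM | PCA/pca.py | getSensors
-- ===== SOURCE A (Python) =====
-- def getSensors(sensorName):
--     sensorID = []       # Variable para almacenar el ID del sensor
--     sensorName_ = []    # Variable temporal para comprobar el nombre y su ID.
--     id = 1              # ID sensor. 0 -> NumSensors(diferentes nombres)
--     for i in range(len(sensorName)):    # Recorremos la lista que almacena el nombre de los sensores
--         if (sensorName[i] not in sensorName_):  # Comprobamos si el nombre del sensor del indice i está almacenado en la lista temporal (sensorName_). Si no lo ésta, entonces:
--             sensorName_.append(sensorName[i])   # Añadimos el nombre del sensor a la lista temporal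
--             sensorID.append(id)                 # Añadimos el ID a la lista sensorID
--             id += 1                             # Incrementamos el valor del ID.
--         else:                                   # Si el nombre del sensor ya se ha almacenado anteriormente en la lista temporal, entonces:
--             for j in range(len(sensorName)):    # Recorremos la lista que almacena los nombres de los sensores.
--                 if sensorName[i] == sensorName[j]:  # Buscamos el índice del sensor que ya ha sido almacenado.
--                     sensorName_.append(sensorName[i])   # Consultamos su nombre y lo añadimos a la lista temporal
--                     sensorID.append(sensorID[j])        # Añadimos el ID que corresponde a ese índice. De esta forma tenemos el mismo ID que el almacenado anteriormente
--                     break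
--     return sensorName, sensorID
-- ===== SOURCE B (Python) =====
-- def getSensors(sensorName):
--     # Phase 1: ordered distinct names, then a table name -> 1-based rank of first occurrence.
--     seen = list(dict.fromkeys(sensorName))
--     ids = {name: i + 1 for i, name in enumerate(seen)}
--     # Phase 2: map every name through the table.
--     sensorID = [ids[n] for n in sensorName]
--     return sensorName, sensorID
-- ===== Notes on version B (the rewrite author's own statement) =====
-- stated objective: faster
-- what changed: Replaces A's single pass with per-element linear membership test and inner full rescan by two separate passes: build the ordered distinct-name list and a name->rank hash table once, then map every name through the table.
import Mathlib
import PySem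

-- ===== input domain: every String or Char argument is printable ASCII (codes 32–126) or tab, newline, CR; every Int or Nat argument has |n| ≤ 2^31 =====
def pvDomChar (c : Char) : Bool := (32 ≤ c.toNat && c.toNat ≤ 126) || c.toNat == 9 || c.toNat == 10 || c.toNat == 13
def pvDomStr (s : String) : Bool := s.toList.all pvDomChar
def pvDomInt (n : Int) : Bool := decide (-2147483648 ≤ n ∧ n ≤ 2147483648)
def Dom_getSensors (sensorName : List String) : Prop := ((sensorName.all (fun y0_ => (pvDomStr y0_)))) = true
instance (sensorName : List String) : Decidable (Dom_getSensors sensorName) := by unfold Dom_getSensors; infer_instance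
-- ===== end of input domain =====

-- B replaces A's single pass (linear membership test plus an inner full rescan per duplicate)
-- by two separate passes: ordered distinct names + a name->rank table, then a lookup pass.

-- ===== PORT A =====
-- inner 'for j in range(len(sensorName)): if sensorName[i] == sensorName[j]: ...; break'
-- (pairs = enumerate(sensorName)); 'sensorID[j]' via pyGet?; the .getD 0 is unreachable
-- (the first matching j is always < len(sensorID)).
def pvInnerA (pairs : List (Int × String)) (sid : List Int) (x : String) : List Int :=
  match pairs with
  | [] => sid
  | (j, y) :: rest =>
    if y = x then sid ++ [(PySem.List.pyGet? sid j).getD 0]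
    else pvInnerA rest sid x

-- one iteration of A's main loop; state = (sensorName_, sensorID, id)
def pvStepA (full : List String) (st : List String × List Int × Int) (p : Int × String) :
    List String × List Int × Int :=
  if p.2 ∉ st.1 then (st.1 ++ [p.2], st.2.1 ++ [st.2.2], st.2.2 + 1)
  else (st.1 ++ [p.2], pvInnerA (PySem.List.enumerate full) st.2.1 p.2, st.2.2)

def getSensors (sensorName : List String) : List String × List Int :=
  let st := (PySem.List.enumerate sensorName).foldl (pvStepA sensorName) ([], [], 1)
  (sensorName, st.2.1)

-- ===== PORT B =====
def getSensors_alt (sensorName : List String) : List String × List Int :=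
  -- seen = list(dict.fromkeys(sensorName))
  let seen := PySem.List.dedup sensorName
  -- ids = {name: i + 1 for i, name in enumerate(seen)}
  let ids : PySem.Dict String Int :=
    (PySem.List.enumerate seen).foldl (fun d p => d.insert p.2 (p.1 + 1)) PySem.Dict.empty
  -- sensorID = [ids[n] for n in sensorName]; ids[n] never raises (n is always a key), so getD
  (sensorName, sensorName.map (fun n => ids.getD n 0))

-- ===== PRECONDITION & SPEC =====
def Spec_getSensors (sensorName : List String) (out : List String × List Int) : Prop := out = getSensors_alt sensorName
instance (sensorName : List String) (out : List String × List Int) : Decidable (Spec_getSensors sensorName out) := by unfold Spec_getSensors; infer_instance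

-- ===== CLAIM (what is proved, stated in full; the proofs are below) =====
def Claim_equal_getSensors : Prop := ∀ (sensorName : List String), Dom_getSensors sensorName → Spec_getSensors sensorName (getSensors sensorName)

-- ===== LEMMAS AND PROOFS =====

-- the common value: 1-based rank of the first occurrence of n in l
def pvRk (l : List String) (n : String) : Int := ((PySem.Set.ofList l).idxOf n : Int) + 1

theorem pvB_getD (l : List String) (n : String) (hn : n ∈ l) :
    ((PySem.List.enumerate (PySem.List.dedup l)).foldl
        (fun d p => d.insert p.2 (p.1 + 1)) PySem.Dict.empty).getD n 0 = pvRk l n := by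
  have hded : PySem.List.dedup l = PySem.Set.ofList l := PySem.List.dedup_eq_ofList l
  set seen := PySem.Set.ofList l with hseen
  have hnodup : seen.Nodup := PySem.Set.nodup_ofList l
  have hmem : n ∈ seen := ((PySem.Set.mem_ofList l n).mpr hn)
  rw [hded]
  have hitems : ((PySem.List.enumerate seen).foldl
      (fun d p => d.insert p.2 (p.1 + 1)) PySem.Dict.empty).items
      = PySem.Dict.empty.items ++ (PySem.List.enumerate seen).map (fun p => (p.2, p.1 + 1)) := by
    apply PySem.Dict.items_foldl_insert_fresh
    · intro a _; exact PySem.Dict.contains_empty (ν := Int) a.2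
    · rw [PySem.List.map_snd_enumerate]; exact hnodup
  have hkeys : ((PySem.List.enumerate seen).foldl
      (fun d p => d.insert p.2 (p.1 + 1)) PySem.Dict.empty).keys.Nodup := by
    exact PySem.Dict.nodup_keys_foldl_insert_key (PySem.List.enumerate seen) (fun (p : Int × String) => p.2) (fun d p => p.1 + 1) PySem.Dict.empty
      PySem.Dict.nodup_keys_empty
  have hk : seen.idxOf n < seen.length := List.idxOf_lt_length_of_mem hmem
  have hpair : ((seen.idxOf n : Int), n) ∈ PySem.List.enumerate seen := by
    rw [PySem.List.mem_enumerate_iff]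
    exact ⟨seen.idxOf n, hk, by simp [List.getElem_idxOf hk]⟩
  have hmemitems : (n, ((seen.idxOf n : Int) + 1)) ∈
      ((PySem.List.enumerate seen).foldl
        (fun d p => d.insert p.2 (p.1 + 1)) PySem.Dict.empty).items := by
    rw [hitems]
    refine List.mem_append_right _ ?_
    exact List.mem_map.mpr ⟨_, hpair, rfl⟩
  rw [PySem.Dict.getD_of_mem_items _ hmemitems hkeys 0]
  simp [pvRk, hseen]

theorem pvInnerA_spec (l : List String) (s : Int) (sid : List Int) (x : String) (hx : x ∈ l) :
    pvInnerA (PySem.List.enumerate l s) sid x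
      = sid ++ [(PySem.List.pyGet? sid (s + (l.idxOf x : Int))).getD 0] := by
  induction l generalizing s with
  | nil => simp at hx
  | cons y l ih =>
    rw [PySem.List.enumerate_cons]
    by_cases hy : y = x
    · subst hy
      simp [pvInnerA, List.idxOf_cons_self]
    · have hx' : x ∈ l := by
        rcases List.mem_cons.mp hx with h | h
        · exact absurd h.symm hy
        · exact h
      rw [show pvInnerA ((s, y) :: PySem.List.enumerate l (s+1)) sid x
            = pvInnerA (PySem.List.enumerate l (s+1)) sid x by simp [pvInnerA, hy]]
      rw [ih (s+1) hx']
      have : List.idxOf x (y :: l) = List.idxOf x l + 1 := by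
        simp [List.idxOf_cons, beq_false_of_ne hy]
      rw [this]
      push_cast
      ring_nf

theorem pvLoopA (full : List String) : ∀ (r p : List String), full = p ++ r →
    (PySem.List.enumerate r (p.length : Int)).foldl (pvStepA full)
        (p, p.map (pvRk full), ((PySem.Set.ofList p).length : Int) + 1)
      = (full, full.map (pvRk full), ((PySem.Set.ofList full).length : Int) + 1) := by
  intro r
  induction r with
  | nil => intro p hp; simp at hp; subst hp; simp
  | cons x r ih =>
    intro p hp
    rw [PySem.List.enumerate_cons, List.foldl_cons]
    have hstep : pvStepA full (p, p.map (pvRk full), ((PySem.Set.ofList p).length : Int) + 1)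
        ((p.length : Int), x)
        = (p ++ [x], (p ++ [x]).map (pvRk full), ((PySem.Set.ofList (p ++ [x])).length : Int) + 1) := by
      by_cases hx : x ∈ p
      · -- duplicate branch: inner scan finds the first occurrence
        have hofl : PySem.Set.ofList (p ++ [x]) = PySem.Set.ofList p := by
          rw [PySem.Set.ofList_append_singleton,
            PySem.Set.add_of_mem ((PySem.Set.mem_ofList p x).mpr hx)]
        have hxfull : x ∈ full := by rw [hp]; exact List.mem_append_left _ hx
        have hidx : full.idxOf x = p.idxOf x := by
          rw [hp, List.idxOf_append_of_mem hx]
        have hlt : p.idxOf x < p.length := List.idxOf_lt_length_of_mem hx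
        have hget : (PySem.List.pyGet? (p.map (pvRk full)) (0 + (full.idxOf x : Int))).getD 0
            = pvRk full x := by
          rw [zero_add, hidx, PySem.List.pyGet?_natCast]
          rw [List.getElem?_map]
          rw [List.getElem?_eq_getElem hlt]
          simp [List.getElem_idxOf hlt]
        rw [pvStepA]
        rw [if_neg (not_not_intro hx)]
        rw [show (PySem.List.enumerate full : List (Int × String))
              = PySem.List.enumerate full 0 from rfl]
        rw [pvInnerA_spec full 0 _ x hxfull, hget, hofl, List.map_append]
        simp [pvRk]
      · -- new name branch
        have hnotmem : x ∉ PySem.Set.ofList p := fun h => hx ((PySem.Set.mem_ofList p x).mp h)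
        have hofl : PySem.Set.ofList (p ++ [x]) = PySem.Set.ofList p ++ [x] := by
          rw [PySem.Set.ofList_append_singleton, PySem.Set.add_of_not_mem hnotmem]
        have hrank : pvRk full x = ((PySem.Set.ofList p).length : Int) + 1 := by
          have hfull : PySem.Set.ofList full = (PySem.Set.ofList p ++ [x])
              ++ ((PySem.Set.ofList r).filter
                  (fun y => !(PySem.Set.contains (PySem.Set.ofList p ++ [x]) y))) := by
            rw [hp, PySem.Set.ofList_append, PySem.Set.update_cons,
              PySem.Set.add_of_not_mem hnotmem, PySem.Set.update_eq_append_filter]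
          have : (PySem.Set.ofList full).idxOf x = (PySem.Set.ofList p).length := by
            rw [hfull, List.idxOf_append_of_mem (List.mem_append_right _ (List.mem_singleton.mpr rfl)),
              List.idxOf_append_of_notMem hnotmem, List.idxOf_cons_self]
            simp
          simp [pvRk, this]
        rw [pvStepA]
        rw [if_pos hx]
        rw [hofl, List.map_append, List.map_singleton, ← hrank]
        refine Prod.ext rfl (Prod.ext rfl ?_)
        simp
        rw [hrank]
    rw [hstep]
    have := ih (p ++ [x]) (by rw [hp]; simp)
    rw [show ((p ++ [x]).length : Int) = (p.length : Int) + 1 by simp] at this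
    exact this

theorem pvA_eq (l : List String) : getSensors l = (l, l.map (pvRk l)) := by
  have h := pvLoopA l l [] rfl
  simp only [List.length_nil, Nat.cast_zero, List.map_nil, PySem.Set.ofList_nil,
    zero_add] at h
  simp [getSensors, h]

theorem pvB_eq (l : List String) : getSensors_alt l = (l, l.map (pvRk l)) := by
  unfold getSensors_alt
  refine Prod.ext rfl ?_
  exact List.map_congr_left (fun n hn => pvB_getD l n hn)

-- ===== VERDICT (by name: the statement is the Claim_ definition above) =====
theorem getSensors_spec : Claim_equal_getSensors := by
  intro l _
  unfold Spec_getSensors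
  rw [pvA_eq, pvB_eq]
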